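-- pv_equiv track=rewrite | github.com/xbmc4lyfe/nzbdavkodi | plugin.video.nzbdav/resources/lib/dv_source.py | _vint_width
-- ===== SOURCE A (Python) =====
-- def _vint_width(first_byte):
--     """Find EBML VINT width from the first byte. Width is the position of the
--     length-descriptor bit (MSB-first). Raises ValueError if no bit is set
--     within the legal 1..8 byte range (malformed or zero-padded input).
--     """
--     mask = 0x80
--     width = 1
--     while width <= 8:
--         if first_byte & mask:
--             return width, mask
--         mask >>= 1
--         width += 1
--     raise ValueError("invalid EBML VINT: no length-descriptor bit in first byte")
-- ===== SOURCE B (Python) =====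
-- def _vint_width(first_byte):
--     """Find EBML VINT width from the first byte, in closed form: the width is
--     8 minus the index of the highest set bit of the low 8 bits."""
--     b = first_byte & 0xFF
--     if b == 0:
--         raise ValueError("invalid EBML VINT: no length-descriptor bit in first byte")
--     p = b.bit_length() - 1
--     return 8 - p, 1 << p
-- ===== Notes on version B (the rewrite author's own statement) =====
-- stated objective: simpler
-- what changed: Replaced the MSB-first loop over the 8 candidate masks by a closed-form computation: mask the low byte, take bit_length()-1 as the highest-set-bit index p, and return (8 - p, 1 << p).
import Mathlib
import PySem

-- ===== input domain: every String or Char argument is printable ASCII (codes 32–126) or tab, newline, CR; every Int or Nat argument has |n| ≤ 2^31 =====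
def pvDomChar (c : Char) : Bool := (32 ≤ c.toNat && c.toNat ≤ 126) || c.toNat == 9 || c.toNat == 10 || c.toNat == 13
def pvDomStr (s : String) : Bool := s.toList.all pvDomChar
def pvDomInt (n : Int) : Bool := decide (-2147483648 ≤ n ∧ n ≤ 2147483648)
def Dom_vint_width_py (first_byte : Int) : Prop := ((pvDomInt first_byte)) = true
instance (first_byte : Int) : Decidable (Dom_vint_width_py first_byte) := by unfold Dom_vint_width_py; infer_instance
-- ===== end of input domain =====

-- B replaces A's MSB-first scan over the 8 candidate masks by a closed-form
-- computation from bit_length (objective: simpler). Return-value equivalence only;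
-- both raise ValueError when first_byte & 0xFF == 0 (excluded by Pre_).

-- ===== PORT A =====
-- 'while width <= 8' loop; fuel counts the remaining iterations (8 at width = 1).
-- fuel 0 = loop exhausted: Python raises ValueError there (outside Pre_), port returns (0, 0).
def vintLoopA (first_byte : Int) (mask width : Int) : Nat → Int × Int
  | 0 => (0, 0)
  | Nat.succ fuel =>
      if PySem.Int.band first_byte mask ≠ 0 then (width, mask)
      else vintLoopA first_byte (mask >>> 1) (width + 1) fuel

def vint_width_py (first_byte : Int) : Int × Int :=
  vintLoopA first_byte 0x80 1 8

-- ===== PORT B =====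
-- b = first_byte & 0xFF; if b == 0 raise ValueError (outside Pre_, port returns (0, 0));
-- p = b.bit_length() - 1; return (8 - p, 1 << p).
def vint_width_py_alt (first_byte : Int) : Int × Int :=
  let b := PySem.Int.band first_byte 255
  if b = 0 then (0, 0)
  else
    let p : Nat := PySem.Int.bitLength b - 1
    ((8 : Int) - (p : Int), (1 : Int) <<< p)

-- ===== PRECONDITION & SPEC =====
-- Pre_ excludes exactly the inputs whose low 8 bits are all zero: there Python A
-- (and Python B) raises ValueError.
def Pre_vint_width_py (first_byte : Int) : Prop := PySem.Int.band first_byte 255 ≠ 0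
instance (first_byte : Int) : Decidable (Pre_vint_width_py first_byte) := by unfold Pre_vint_width_py; infer_instance
def pvWitness_vint_width_py : Int := 0x45

def Spec_vint_width_py (first_byte : Int) (out : Int × Int) : Prop := out = vint_width_py_alt first_byte
instance (first_byte : Int) (out : Int × Int) : Decidable (Spec_vint_width_py first_byte out) := by unfold Spec_vint_width_py; infer_instance

-- ===== CLAIM (what is proved, stated in full; the proofs are below) =====
def Claim_equal_vint_width_py : Prop := ∀ (first_byte : Int), Dom_vint_width_py first_byte → Pre_vint_width_py first_byte → Spec_vint_width_py first_byte (vint_width_py first_byte)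

-- ===== LEMMAS AND PROOFS =====

-- band of a negative with a nonnegative, from the definition
theorem pv_band_neg (a b : Int) (ha : ¬ 0 ≤ a) (hb : 0 ≤ b) :
    PySem.Int.band a b = ((b.toNat - (b.toNat &&& (-a - 1).toNat) : Nat) : Int) := by
  rw [PySem.Int.band.eq_1, if_neg ha, if_pos hb]

-- Nat: and with a mask below 256 only sees the low byte
theorem pv_and_mod256 (n m : Nat) (hm : m < 256) : n &&& m = (n % 256) &&& m := by
  have h256 : (256 : Nat) = 2 ^ 8 := rfl
  apply Nat.eq_of_testBit_eq
  intro i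
  rw [h256]
  simp only [Nat.testBit_and, Nat.testBit_mod_two_pow]
  by_cases h : i < 8
  · simp [h]
  · have : m.testBit i = false := by
      apply Nat.testBit_lt_two_pow
      calc m < 256 := hm
        _ = 2 ^ 8 := rfl
        _ ≤ 2 ^ i := Nat.pow_le_pow_right (by norm_num) (by omega)
    simp [this, h]

-- if a and b agree under every mask below 256, both ports agree on them
theorem pv_congrA (a b : Int)
    (h : ∀ m : Int, 0 ≤ m → m < 256 → PySem.Int.band a m = PySem.Int.band b m) :
    vint_width_py a = vint_width_py b := by
  have s1 : ((128:Int) >>> 1) = 64 := by decide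
  have s2 : ((64:Int) >>> 1) = 32 := by decide
  have s3 : ((32:Int) >>> 1) = 16 := by decide
  have s4 : ((16:Int) >>> 1) = 8 := by decide
  have s5 : ((8:Int) >>> 1) = 4 := by decide
  have s6 : ((4:Int) >>> 1) = 2 := by decide
  have s7 : ((2:Int) >>> 1) = 1 := by decide
  simp only [vint_width_py, vintLoopA, s1, s2, s3, s4, s5, s6, s7]
  rw [h 128 (by norm_num) (by norm_num), h 64 (by norm_num) (by norm_num),
      h 32 (by norm_num) (by norm_num), h 16 (by norm_num) (by norm_num),
      h 8 (by norm_num) (by norm_num), h 4 (by norm_num) (by norm_num),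
      h 2 (by norm_num) (by norm_num), h 1 (by norm_num) (by norm_num)]

theorem pv_congrB (a b : Int)
    (h : ∀ m : Int, 0 ≤ m → m < 256 → PySem.Int.band a m = PySem.Int.band b m) :
    vint_width_py_alt a = vint_width_py_alt b := by
  simp only [vint_width_py_alt]
  rw [h 255 (by norm_num) (by norm_num)]

-- nonnegative inputs agree with their low byte under every mask below 256
theorem pv_low_nonneg (n : Nat) (m : Int) (hm0 : 0 ≤ m) (_hm : m < 256) :
    PySem.Int.band (n : Int) m = PySem.Int.band ((n % 256 : Nat) : Int) m := by
  rw [PySem.Int.band_of_nonneg (by positivity) hm0,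
      PySem.Int.band_of_nonneg (by positivity) hm0]
  congr 1
  simp only [Int.toNat_natCast]
  exact pv_and_mod256 n m.toNat (by omega)

-- negative inputs -k-1 agree with -(k % 256)-1 under every mask below 256
theorem pv_low_neg (k : Nat) (m : Int) (hm0 : 0 ≤ m) (_hm : m < 256) :
    PySem.Int.band (-(k : Int) - 1) m = PySem.Int.band (-((k % 256 : Nat) : Int) - 1) m := by
  have ha : ¬ (0 : Int) ≤ -(k : Int) - 1 := by omega
  have ha' : ¬ (0 : Int) ≤ -((k % 256 : Nat) : Int) - 1 := by omega
  have hk : (-(-(k : Int) - 1) - 1).toNat = k := by omega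
  have hk' : (-(-((k % 256 : Nat) : Int) - 1) - 1).toNat = k % 256 := by omega
  rw [pv_band_neg _ _ ha hm0, pv_band_neg _ _ ha' hm0, hk, hk',
      Nat.and_comm m.toNat k, Nat.and_comm m.toNat (k % 256),
      pv_and_mod256 k m.toNat (by omega)]

-- the 256 nonnegative representatives, checked by computation
set_option maxRecDepth 4096 in
theorem pv_key_nonneg : ∀ r, r < 256 → vint_width_py ((r : Nat) : Int) = vint_width_py_alt ((r : Nat) : Int) := by
  decide

-- the 256 negative representatives, checked by computation
set_option maxRecDepth 4096 in
theorem pv_key_neg : ∀ r, r < 256 → vint_width_py (-((r : Nat) : Int) - 1) = vint_width_py_alt (-((r : Nat) : Int) - 1) := by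
  decide

-- ===== VERDICT (by name: the statement is the Claim_ definition above) =====
theorem vint_width_py_spec : Claim_equal_vint_width_py := by
  intro fb _ _
  unfold Spec_vint_width_py
  by_cases h : 0 ≤ fb
  · obtain ⟨n, rfl⟩ := Int.eq_ofNat_of_zero_le h
    rw [pv_congrA _ _ (pv_low_nonneg n), pv_congrB _ _ (pv_low_nonneg n)]
    exact pv_key_nonneg _ (Nat.mod_lt n (by norm_num))
  · obtain ⟨k, rfl⟩ : ∃ k : Nat, fb = -(k : Int) - 1 := ⟨(-fb - 1).toNat, by omega⟩
    rw [pv_congrA _ _ (pv_low_neg k), pv_congrB _ _ (pv_low_neg k)]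
    exact pv_key_neg _ (Nat.mod_lt k (by norm_num))
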